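-- pv_equiv track=rewrite | github.com/TomBenRu/advent_of_code_2023 | tag_12/main.py | get_min_needed_tiles
-- ===== SOURCE A (Python) =====
-- def get_min_needed_tiles(curr_springs: str, groups: list[int], curr_index_to_put_in: int) -> int:
--     needed_damaged_springs = sum(groups) - curr_springs.count('#')
--     needed_groups = []
--     for g in sorted(groups, reverse=True):
--         needed_groups.append(g)
--         if sum(needed_groups) >= needed_damaged_springs:
--             break
--
--     min_sum_free_tiles = len(needed_groups) + (curr_springs[curr_index_to_put_in-1] == '.') + (curr_springs[-1] == '.')
--
--     return needed_damaged_springs + min_sum_free_tiles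
-- ===== SOURCE B (Python) =====
-- def get_min_needed_tiles(curr_springs: str, groups: list[int], curr_index_to_put_in: int) -> int:
--     # Dual view: instead of greedily taking largest groups until the still-needed
--     # damaged count is covered, count how many of the smallest groups can be SET
--     # ASIDE: a prefix of the ascending sort is droppable iff its sum is at most
--     # the number of '#' already placed (never dropping all groups).
--     placed = curr_springs.count('#')
--     asc = sorted(groups)
--     droppable = 0
--     running = 0
--     j = 0
--     for g in asc[:-1]:
--         running += g
--         j += 1
--         if running <= placed:
--             droppable = j
--     group_count = len(asc) - droppable
--     needed_damaged_springs = sum(groups) - placed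
--     return (needed_damaged_springs + group_count
--             + (curr_springs[curr_index_to_put_in - 1] == '.') + (curr_springs[-1] == '.'))
-- ===== Notes on version B (the rewrite author's own statement) =====
-- stated objective: alternative
-- what changed: Replaces A's greedy take-largest-until-covered loop (with its repeated sum() rescans and early break) by the dual computation: sort ascending and find, in one breakless pass, the largest prefix of smallest groups whose sum is at most the count of '#' already placed; the group count is len(groups) minus that droppable prefix.
import Mathlib
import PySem

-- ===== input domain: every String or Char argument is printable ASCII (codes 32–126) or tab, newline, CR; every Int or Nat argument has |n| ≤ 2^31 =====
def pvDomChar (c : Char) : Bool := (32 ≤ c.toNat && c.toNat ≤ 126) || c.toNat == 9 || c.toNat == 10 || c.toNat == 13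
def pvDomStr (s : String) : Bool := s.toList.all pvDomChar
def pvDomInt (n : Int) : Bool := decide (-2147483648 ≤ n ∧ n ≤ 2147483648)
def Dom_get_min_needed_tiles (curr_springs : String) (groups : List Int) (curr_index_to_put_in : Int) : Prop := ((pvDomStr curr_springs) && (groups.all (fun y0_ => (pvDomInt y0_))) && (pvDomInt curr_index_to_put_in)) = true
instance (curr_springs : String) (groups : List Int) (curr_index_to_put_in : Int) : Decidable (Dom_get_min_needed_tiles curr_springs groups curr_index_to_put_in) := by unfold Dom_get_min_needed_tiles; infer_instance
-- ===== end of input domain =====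

-- B replaces A's take-largest-until-covered loop (with repeated sum() rescans and a break)
-- by the dual: one breakless pass over the ascending sort finding how many of the SMALLEST
-- groups can be set aside (prefix sum ≤ number of '#' already placed); alternative algorithm.

-- ===== PORT A =====
-- 'for g in sorted(groups, reverse=True): needed_groups.append(g); if sum(needed_groups) >= …: break'
def pvLoopA (needed : Int) : List Int → List Int → List Int
  | [], acc => acc
  | g :: rest, acc =>
    let acc' := acc ++ [g]
    if acc'.sum ≥ needed then acc' else pvLoopA needed rest acc'

def get_min_needed_tiles (curr_springs : String) (groups : List Int) (curr_index_to_put_in : Int) : Int :=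
  let needed_damaged_springs : Int := groups.sum - (PySem.Str.count curr_springs "#" : Int)
  let needed_groups := pvLoopA needed_damaged_springs (PySem.List.sorted groups (fun x => x) true) []
  let min_sum_free_tiles : Int := (needed_groups.length : Int)
    + (if PySem.Str.pyGet? curr_springs (curr_index_to_put_in - 1) == some '.' then 1 else 0)
    + (if PySem.Str.pyGet? curr_springs (-1) == some '.' then 1 else 0)
  needed_damaged_springs + min_sum_free_tiles

-- ===== PORT B =====
-- 'for g in asc[:-1]: running += g; j += 1; if running <= placed: droppable = j'
def pvDropB (placed : Int) : List Int → Int → Nat → Nat → Nat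
  | [], _, _, best => best
  | g :: rest, running, j, best =>
    let running' := running + g
    let j' := j + 1
    if running' ≤ placed then pvDropB placed rest running' j' j'
    else pvDropB placed rest running' j' best

def get_min_needed_tiles_alt (curr_springs : String) (groups : List Int) (curr_index_to_put_in : Int) : Int :=
  let placed : Int := (PySem.Str.count curr_springs "#" : Int)
  let asc := PySem.List.sorted groups (fun x => x) false
  let droppable := pvDropB placed (PySem.List.slice asc none (some (-1))) 0 0 0
  let group_count : Int := (asc.length : Int) - (droppable : Int)
  let needed_damaged_springs : Int := groups.sum - placed
  needed_damaged_springs + group_count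
    + (if PySem.Str.pyGet? curr_springs (curr_index_to_put_in - 1) == some '.' then 1 else 0)
    + (if PySem.Str.pyGet? curr_springs (-1) == some '.' then 1 else 0)

-- ===== PRECONDITION & SPEC =====
-- A raises IndexError when curr_springs is empty or curr_index_to_put_in-1 is out of Python index range
def Pre_get_min_needed_tiles (curr_springs : String) (groups : List Int) (curr_index_to_put_in : Int) : Prop :=
  PySem.Raise.InRange curr_springs.toList.length (curr_index_to_put_in - 1) ∧ curr_springs.toList ≠ []
instance (curr_springs : String) (groups : List Int) (curr_index_to_put_in : Int) : Decidable (Pre_get_min_needed_tiles curr_springs groups curr_index_to_put_in) := by unfold Pre_get_min_needed_tiles; infer_instance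
def pvWitness_get_min_needed_tiles : String × List Int × Int := ("?#.", [3, 1], 2)
def Spec_get_min_needed_tiles (curr_springs : String) (groups : List Int) (curr_index_to_put_in : Int) (out : Int) : Prop := out = get_min_needed_tiles_alt curr_springs groups curr_index_to_put_in
instance (curr_springs : String) (groups : List Int) (curr_index_to_put_in : Int) (out : Int) : Decidable (Spec_get_min_needed_tiles curr_springs groups curr_index_to_put_in out) := by unfold Spec_get_min_needed_tiles; infer_instance

-- ===== CLAIM (what is proved, stated in full; the proofs are below) =====
def Claim_equal_get_min_needed_tiles : Prop := ∀ (curr_springs : String) (groups : List Int) (curr_index_to_put_in : Int), Dom_get_min_needed_tiles curr_springs groups curr_index_to_put_in → Pre_get_min_needed_tiles curr_springs groups curr_index_to_put_in → Spec_get_min_needed_tiles curr_springs groups curr_index_to_put_in (get_min_needed_tiles curr_springs groups curr_index_to_put_in)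

-- ===== LEMMAS AND PROOFS =====

-- a simple count: first index i ≥ 1 whose running sum reaches `needed`, else the length
def cntA (needed t : Int) : List Int → Nat
  | [] => 0
  | g :: rest => if t + g ≥ needed then 1 else 1 + cntA needed (t + g) rest

theorem pvLoopA_length (needed : Int) (l acc : List Int) :
    (pvLoopA needed l acc).length = acc.length + cntA needed acc.sum l := by
  induction l generalizing acc with
  | nil => simp [pvLoopA, cntA]
  | cons g rest ih =>
    simp only [pvLoopA, cntA]
    have hsum : (acc ++ [g]).sum = acc.sum + g := by simp
    by_cases h : acc.sum + g ≥ needed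
    · rw [if_pos (by omega : (acc ++ [g]).sum ≥ needed), if_pos h]; simp
    · rw [if_neg (by omega : ¬ (acc ++ [g]).sum ≥ needed), if_neg h]
      rw [ih (acc ++ [g])]
      simp [hsum]; omega

theorem cntA_le (needed t : Int) (l : List Int) : cntA needed t l ≤ l.length := by
  induction l generalizing t with
  | nil => simp [cntA]
  | cons g rest ih =>
    simp only [cntA]
    split_ifs with h
    · simp
    · have := ih (t + g); simp; omega

theorem cntA_pos (needed t g : Int) (rest : List Int) :
    1 ≤ cntA needed t (g :: rest) := by
  simp only [cntA]; split_ifs <;> omega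

theorem cntA_min (needed t : Int) (l : List Int) :
    ∀ i, 1 ≤ i → i < cntA needed t l → t + (l.take i).sum < needed := by
  induction l generalizing t with
  | nil => simp [cntA]
  | cons g rest ih =>
    intro i h1 hlt
    simp only [cntA] at hlt
    split_ifs at hlt with h
    · omega
    · rcases Nat.exists_eq_add_of_le h1 with ⟨i', rfl⟩
      cases i' with
      | zero => simpa using (by omega : ¬ t + g ≥ needed)
      | succ k =>
        have hrec := ih (t + g) (k + 1) (by omega) (by omega)
        have hsz : 1 + (k + 1) = (k + 1) + 1 := by omega
        rw [hsz, List.take_succ_cons, List.sum_cons]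
        omega

theorem cntA_hit (needed t : Int) (l : List Int) :
    cntA needed t l = l.length ∨ t + (l.take (cntA needed t l)).sum ≥ needed := by
  induction l generalizing t with
  | nil => simp [cntA]
  | cons g rest ih =>
    simp only [cntA]
    split_ifs with h
    · right; simpa using h
    · rcases ih (t + g) with h' | h'
      · left; simp [h']; omega
      · right
        have hsz : 1 + cntA needed (t + g) rest = cntA needed (t + g) rest + 1 := by omega
        rw [hsz, List.take_succ_cons, List.sum_cons]
        omega

-- characterization of B's breakless last-qualifying-prefix pass
theorem pvDropB_spec (placed : Int) (l : List Int) :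
    ∀ (running : Int) (j best : Nat), best ≤ j →
    best ≤ pvDropB placed l running j best ∧
    pvDropB placed l running j best ≤ j + l.length ∧
    (pvDropB placed l running j best = best ∨
      (j < pvDropB placed l running j best ∧
        running + (l.take (pvDropB placed l running j best - j)).sum ≤ placed)) ∧
    (∀ k, j < k → k ≤ j + l.length → pvDropB placed l running j best < k →
      ¬ running + (l.take (k - j)).sum ≤ placed) := by
  induction l with
  | nil =>
    intro running j best hbj
    refine ⟨?_, ?_, ?_, ?_⟩
    · simp [pvDropB]
    · simp only [pvDropB, List.length_nil]; omega
    · left; simp [pvDropB]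
    · intro k hk1 hk2 _; simp only [List.length_nil] at hk2; omega
  | cons g rest ih =>
    intro running j best hbj
    simp only [pvDropB, List.length_cons]
    split_ifs with h
    · obtain ⟨hm1, hm2, hm3, hm4⟩ := ih (running + g) (j + 1) (j + 1) (le_refl _)
      refine ⟨by omega, by omega, ?_, ?_⟩
      · right
        refine ⟨by omega, ?_⟩
        rcases hm3 with hq | ⟨hq1, hq2⟩
        · have hms : pvDropB placed rest (running + g) (j + 1) (j + 1) - j = 1 := by omega
          rw [hms]
          simpa using h
        · have hms : pvDropB placed rest (running + g) (j + 1) (j + 1) - j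
              = (pvDropB placed rest (running + g) (j + 1) (j + 1) - (j + 1)) + 1 := by omega
          rw [hms, List.take_succ_cons, List.sum_cons]
          omega
      · intro k hk1 hk2 hk3
        have hrec := hm4 k (by omega) (by omega) hk3
        have hks : k - j = (k - (j + 1)) + 1 := by omega
        rw [hks, List.take_succ_cons, List.sum_cons]
        omega
    · obtain ⟨hm1, hm2, hm3, hm4⟩ := ih (running + g) (j + 1) best (by omega)
      refine ⟨hm1, by omega, ?_, ?_⟩
      · rcases hm3 with hq | ⟨hq1, hq2⟩
        · left; exact hq
        · right
          refine ⟨by omega, ?_⟩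
          have hms : pvDropB placed rest (running + g) (j + 1) best - j
              = (pvDropB placed rest (running + g) (j + 1) best - (j + 1)) + 1 := by omega
          rw [hms, List.take_succ_cons, List.sum_cons]
          omega
      · intro k hk1 hk2 hk3
        by_cases hkj : k = j + 1
        · subst hkj
          have hks : j + 1 - j = 1 := by omega
          rw [hks]
          simpa using h
        · have hrec := hm4 k (by omega) (by omega) hk3
          have hks : k - j = (k - (j + 1)) + 1 := by omega
          rw [hks, List.take_succ_cons, List.sum_cons]
          omega

-- the descending sort is the reverse of the ascending sort (identity key, Int values)
theorem sorted_rev_eq_reverse (l : List Int) :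
    PySem.List.sorted l (fun x => x) true = (PySem.List.sorted l (fun x => x) false).reverse := by
  apply List.Perm.eq_of_pairwise (le := fun a b : Int => b ≤ a)
  · exact fun a b _ _ h1 h2 => le_antisymm h2 h1
  · exact PySem.List.sorted_pairwise_rev l (fun x => x)
  · exact (List.pairwise_reverse).2 (PySem.List.sorted_pairwise l (fun x => x))
  · exact (PySem.List.sorted_perm l (fun x => x) true).trans
      ((PySem.List.sorted_perm l (fun x => x) false).symm.trans (List.reverse_perm _).symm)

-- prefix sums of the reverse: sum of the top i = total − sum of the bottom (n−i)
theorem sum_take_reverse (l : List Int) (i : Nat) :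
    (l.reverse.take i).sum = l.sum - (l.take (l.length - i)).sum := by
  rw [List.take_reverse, List.sum_reverse]
  have := List.sum_take_add_sum_drop l (l.length - i)
  omega

-- the core count equality: A's greedy count = n − B's droppable count
theorem core_count (placed : Int) (hplaced : 0 ≤ placed) (asc : List Int) :
    (cntA (asc.sum - placed) 0 asc.reverse : Int)
      = (asc.length : Int) - (pvDropB placed asc.dropLast 0 0 0 : Int) := by
  obtain ⟨_, hm2, hm3, hm4⟩ := pvDropB_spec placed asc.dropLast 0 0 0 (le_refl _)
  have hdll : asc.dropLast.length = asc.length - 1 := by simp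
  rw [hdll] at hm2
  have htake : ∀ k, k ≤ asc.length - 1 → (asc.dropLast.take k).sum = (asc.take k).sum := by
    intro k hk
    rw [List.dropLast_eq_take, List.take_take]
    have hmin : min k (asc.length - 1) = k := by omega
    rw [hmin]
  have hqual : (asc.take (pvDropB placed asc.dropLast 0 0 0)).sum ≤ placed := by
    rcases hm3 with h0 | ⟨_, hq⟩
    · rw [h0]; simpa using hplaced
    · rw [← htake _ (by omega)]
      simpa using hq
  have hmax : ∀ k, pvDropB placed asc.dropLast 0 0 0 < k → k ≤ asc.length - 1 →
      ¬ (asc.take k).sum ≤ placed := by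
    intro k h1 h2 hle
    exact hm4 k (by omega) (by rw [hdll]; omega) h1 (by simpa [htake k h2] using hle)
  have hcle := cntA_le (asc.sum - placed) 0 asc.reverse
  rw [List.length_reverse] at hcle
  rcases Nat.eq_zero_or_pos asc.length with h0 | hpos
  · have hasc : asc = [] := List.length_eq_zero_iff.mp h0
    subst hasc
    simp [cntA, pvDropB]
  · have hcpos : 1 ≤ cntA (asc.sum - placed) 0 asc.reverse := by
      cases hrev : asc.reverse with
      | nil =>
        have hnil : asc = [] := List.reverse_eq_nil_iff.mp hrev
        subst hnil
        simp at hpos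
      | cons g rest => exact cntA_pos _ _ _ _
    have h1 : cntA (asc.sum - placed) 0 asc.reverse
        ≤ asc.length - pvDropB placed asc.dropLast 0 0 0 := by
      by_contra hcon
      push_neg at hcon
      have hrec := cntA_min (asc.sum - placed) 0 asc.reverse
        (asc.length - pvDropB placed asc.dropLast 0 0 0) (by omega) (by omega)
      rw [sum_take_reverse] at hrec
      have hnm : asc.length - (asc.length - pvDropB placed asc.dropLast 0 0 0)
          = pvDropB placed asc.dropLast 0 0 0 := by omega
      rw [hnm] at hrec
      omega
    have h2 : asc.length - pvDropB placed asc.dropLast 0 0 0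
        ≤ cntA (asc.sum - placed) 0 asc.reverse := by
      by_contra hcon
      push_neg at hcon
      rcases cntA_hit (asc.sum - placed) 0 asc.reverse with hfull | hge
      · rw [List.length_reverse] at hfull; omega
      · rw [sum_take_reverse] at hge
        exact hmax (asc.length - cntA (asc.sum - placed) 0 asc.reverse)
          (by omega) (by omega) (by omega)
    omega

-- ===== VERDICT (by name: the statement is the Claim_ definition above) =====
theorem get_min_needed_tiles_spec : Claim_equal_get_min_needed_tiles := by
  intro s groups k _ _
  unfold Spec_get_min_needed_tiles get_min_needed_tiles get_min_needed_tiles_alt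
  simp only []
  rw [sorted_rev_eq_reverse groups]
  set asc := PySem.List.sorted groups (fun x => x) false with hasc
  have hsum : asc.sum = groups.sum :=
    (PySem.List.sorted_perm groups (fun x => x) false).sum_eq
  rw [pvLoopA_length]
  simp only [List.length_nil, List.sum_nil, Nat.zero_add]
  rw [PySem.List.slice_to_neg_one]
  have hcore := core_count (PySem.Str.count s "#" : Int) (Int.natCast_nonneg _) asc
  rw [hsum] at hcore
  rw [hcore]
  ring
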